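-- pv_equiv track=rewrite | github.com/overcookedTomato/sha1 | sha.py | message_pad
-- ===== SOURCE A (Python) =====
-- def bin_64bit(dec):
-- 	return(str(format(dec,'064b')))
--
-- def message_pad(bit_list):
-- 	pad_one = bit_list + '1'
-- 	pad_len = len(pad_one)
-- 	k=0
-- 	while ((pad_len+k)-448)%512 != 0:
-- 		k+=1
-- 	back_append_0 = '0'*k
-- 	back_append_1 = bin_64bit(len(bit_list))
-- 	return(pad_one+back_append_0+back_append_1)
-- ===== SOURCE B (Python) =====
-- def message_pad(bit_list):
--     pad_len = len(bit_list) + 1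
--     k = (448 - pad_len) % 512
--     return bit_list + '1' + '0' * k + format(len(bit_list), '064b')
-- ===== Notes on version B (the rewrite author's own statement) =====
-- stated objective: simpler
-- what changed: The zero-pad count is computed in closed form as (448 - pad_len) % 512 instead of incrementing k in a while loop until (pad_len+k-448) % 512 == 0.
import Mathlib
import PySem

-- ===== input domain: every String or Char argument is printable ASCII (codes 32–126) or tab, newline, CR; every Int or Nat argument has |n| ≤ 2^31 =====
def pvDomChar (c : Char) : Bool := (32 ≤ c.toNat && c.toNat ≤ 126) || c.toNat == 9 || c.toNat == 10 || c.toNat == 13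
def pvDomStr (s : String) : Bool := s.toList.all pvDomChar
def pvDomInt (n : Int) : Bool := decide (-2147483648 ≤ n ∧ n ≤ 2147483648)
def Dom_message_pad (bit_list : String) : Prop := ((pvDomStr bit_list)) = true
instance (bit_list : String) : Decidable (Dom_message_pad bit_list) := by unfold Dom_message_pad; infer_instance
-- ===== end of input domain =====

-- B replaces A's incremental while-loop search for the zero-pad count by the closed form (448 - pad_len) % 512 (objective: simpler).

-- ===== PORT A =====
-- bin_64bit(dec) = format(dec,'064b'); exact for dec ≥ 0 (the only calls here: dec = len(bit_list) ≥ 0):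
-- binary digits via PySem.Int.toBinChars (= format(dec,'b')), zero-filled on the left to width 64.
def bin64 (n : Int) : List Char :=
  let d := PySem.Int.toBinChars n
  List.replicate (64 - d.length) '0' ++ d

-- the 'while ((pad_len+k)-448)%512 != 0: k+=1' loop, step for step; the fuel argument only
-- makes the recursion structural: 512 steps always suffice (the zero-pad count is < 512),
-- proved in padLoop_eq below — it never changes the computation.
def padLoop (padLen : Int) : Nat → Nat → Nat
  | 0, k => k
  | fuel + 1, k =>
    if PySem.Int.mod (padLen + (k : Int) - 448) 512 = 0 then k
    else padLoop padLen fuel (k + 1)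

def message_pad (bit_list : String) : String :=
  let pad_one := bit_list.toList ++ ['1']
  let pad_len : Int := pad_one.length
  let k := padLoop pad_len 512 0
  let back_append_0 := List.replicate k '0'
  let back_append_1 := bin64 (bit_list.toList.length : Int)
  String.ofList (pad_one ++ back_append_0 ++ back_append_1)

-- ===== PORT B =====
def message_pad_alt (bit_list : String) : String :=
  let pad_len : Int := (bit_list.toList.length : Int) + 1
  let k := (PySem.Int.mod (448 - pad_len) 512).toNat
  String.ofList (bit_list.toList ++ '1' :: (List.replicate k '0' ++ bin64 (bit_list.toList.length : Int)))

-- ===== PRECONDITION & SPEC =====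
def Spec_message_pad (bit_list : String) (out : String) : Prop := out = message_pad_alt bit_list
instance (bit_list : String) (out : String) : Decidable (Spec_message_pad bit_list out) := by unfold Spec_message_pad; infer_instance

-- ===== CLAIM (what is proved, stated in full; the proofs are below) =====
def Claim_equal_message_pad : Prop := ∀ (bit_list : String), Dom_message_pad bit_list → Spec_message_pad bit_list (message_pad bit_list)

-- ===== LEMMAS AND PROOFS =====
lemma padLoop_eq (padLen : Int) (fuel k : Nat)
    (hf : (PySem.Int.mod (448 - padLen - (k : Int)) 512).toNat < fuel) :
    (padLoop padLen fuel k : Int) = (k : Int) + PySem.Int.mod (448 - padLen - (k : Int)) 512 := by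
  induction fuel generalizing k with
  | zero => omega
  | succ fuel ih =>
    rw [padLoop]
    split
    · rename_i h
      rw [PySem.Int.mod_eq_emod_of_pos (by norm_num)] at h ⊢
      omega
    · rename_i h
      have h1 : (PySem.Int.mod (448 - padLen - ((k + 1 : Nat) : Int)) 512).toNat < fuel := by
        rw [PySem.Int.mod_eq_emod_of_pos (by norm_num)] at h hf ⊢
        push_cast
        omega
      rw [ih (k + 1) h1]
      rw [PySem.Int.mod_eq_emod_of_pos (by norm_num)] at h ⊢
      rw [PySem.Int.mod_eq_emod_of_pos (by norm_num)]
      push_cast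
      omega

-- ===== VERDICT (by name: the statement is the Claim_ definition above) =====
theorem message_pad_spec : Claim_equal_message_pad := by
  intro bit_list _
  show message_pad bit_list = message_pad_alt bit_list
  simp only [message_pad, message_pad_alt, List.length_append, List.length_cons,
    List.length_nil, Nat.cast_add, Nat.cast_one, zero_add]
  have h := padLoop_eq ((bit_list.toList.length : Int) + 1) 512 0
    (by rw [PySem.Int.mod_eq_emod_of_pos (by norm_num)]; push_cast; omega)
  have hnn : 0 ≤ PySem.Int.mod (448 - ((bit_list.toList.length : Int) + 1)) 512 :=
    PySem.Int.mod_nonneg _ (by norm_num)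
  have hk : padLoop ((bit_list.toList.length : Int) + 1) 512 0
      = (PySem.Int.mod (448 - ((bit_list.toList.length : Int) + 1)) 512).toNat := by
    rw [PySem.Int.mod_eq_emod_of_pos (by norm_num)] at h hnn ⊢
    omega
  rw [hk]
  simp
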